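-- pv_equiv track=rewrite | github.com/martintierro/ALGOCOM-Solutions | oblivion.py | solve
-- ===== SOURCE A (Python) =====
-- def solve(cards):
--     loop = cards[0] + 1
--     cards = cards[1:]
--     count = 0
--     while loop > 0:
--         for j in range(len(cards)):
--             if cards[j] > 0:
--                 cards[j] -= 1
--                 count += 1
--         loop -= 1
--         if loop > 0:
--             count += 1
--     return count
-- ===== SOURCE B (Python) =====
-- def solve(cards):
--     L = cards[0] + 1
--     rest = cards[1:]
--     if L <= 0:
--         return 0
--     return sum(min(max(c, 0), L) for c in rest) + (L - 1)
-- ===== Notes on version B (the rewrite author's own statement) =====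
-- stated objective: faster
-- what changed: Replaced the simulation of L = first card + 1 full decrement passes by a closed-form single pass: each remaining card contributes min(max(c,0), L) decrements and the loop counter adds L-1, so the O(L*n) while/for simulation becomes one sum.
import Mathlib
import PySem

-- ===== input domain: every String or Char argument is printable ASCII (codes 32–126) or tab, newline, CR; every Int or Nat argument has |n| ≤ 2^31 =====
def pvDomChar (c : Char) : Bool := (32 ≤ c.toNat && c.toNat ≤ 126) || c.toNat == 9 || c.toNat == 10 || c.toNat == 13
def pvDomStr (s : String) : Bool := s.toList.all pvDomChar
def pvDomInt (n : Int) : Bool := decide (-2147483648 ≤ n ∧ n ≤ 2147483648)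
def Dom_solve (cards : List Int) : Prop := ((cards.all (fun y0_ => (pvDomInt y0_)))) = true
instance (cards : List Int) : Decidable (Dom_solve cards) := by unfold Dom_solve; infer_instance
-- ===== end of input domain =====

-- B replaces A's simulation of cards[0]+1 decrement passes by a closed-form single pass (faster: asymptotic, O(L*n) -> O(n)).


-- ===== PORT A =====
-- one 'for j in range(len(cards))' pass: decrement each positive card, count each decrement
def solvePass : List Int → Int → List Int × Int
  | [], count => ([], count)
  | c :: cs, count =>
    if c > 0 then
      let r := solvePass cs (count + 1)
      ((c - 1) :: r.1, r.2)
    else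
      let r := solvePass cs count
      (c :: r.1, r.2)

-- the 'while loop > 0' loop; terminates because loop strictly decreases
def solveWhile (cards : List Int) (loop count : Int) : Int :=
  if h : loop > 0 then
    let r := solvePass cards count
    let loop' := loop - 1
    solveWhile r.1 loop' (if loop' > 0 then r.2 + 1 else r.2)
  else count
termination_by loop.toNat
decreasing_by omega

def solve (cards : List Int) : Int :=
  match cards with
  | [] => 0          -- cards[0] raises IndexError in Python; excluded by Pre_solve
  | c :: rest => solveWhile rest (c + 1) 0

-- ===== PORT B =====
def solve_alt (cards : List Int) : Int :=
  match cards with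
  | [] => 0          -- cards[0] raises IndexError in Python; excluded by Pre_solve
  | c :: rest =>
    let L := c + 1
    if L ≤ 0 then 0
    else (rest.map (fun x => min (max x 0) L)).sum + (L - 1)

-- ===== PRECONDITION & SPEC =====
-- Pre_ excludes only the empty list, on which A raises IndexError (cards[0]).
def Pre_solve (cards : List Int) : Prop := cards ≠ []
instance (cards : List Int) : Decidable (Pre_solve cards) := by unfold Pre_solve; infer_instance
def pvWitness_solve : List Int := ([2, 3, 0, 1])

def Spec_solve (cards : List Int) (out : Int) : Prop := out = solve_alt cards
instance (cards : List Int) (out : Int) : Decidable (Spec_solve cards out) := by unfold Spec_solve; infer_instance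

-- ===== CLAIM (what is proved, stated in full; the proofs are below) =====
def Claim_equal_solve : Prop := ∀ (cards : List Int), Dom_solve cards → Pre_solve cards → Spec_solve cards (solve cards)

-- ===== LEMMAS AND PROOFS =====

-- number of positive cards in a pass
def posCount (cards : List Int) : Int := (cards.map (fun c => if c > 0 then (1 : Int) else 0)).sum

def decPass (cards : List Int) : List Int := cards.map (fun c => if c > 0 then c - 1 else c)

theorem solvePass_eq (cards : List Int) (count : Int) :
    solvePass cards count = (decPass cards, count + posCount cards) := by
  induction cards generalizing count with
  | nil => simp [solvePass, decPass, posCount]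
  | cons c cs ih =>
    by_cases h : c > 0 <;> simp [solvePass, decPass, posCount, h, ih] <;> ring

def contrib (cards : List Int) (L : Int) : Int := (cards.map (fun x => min (max x 0) L)).sum

theorem min_step (x L : Int) (hL : L > 0) :
    min (max x 0) L = (if x > 0 then (1 : Int) else 0) + min (max (if x > 0 then x - 1 else x) 0) (L - 1) := by
  by_cases h : x > 0 <;> (simp [h]; omega)

theorem contrib_step (cards : List Int) (L : Int) (hL : L > 0) :
    contrib cards L = posCount cards + contrib (decPass cards) (L - 1) := by
  induction cards with
  | nil => simp [contrib, posCount, decPass]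
  | cons c cs ih =>
    simp only [contrib, posCount, decPass, List.map_cons, List.sum_cons, List.map_map] at *
    rw [min_step c L hL]
    omega

theorem contrib_zero (cards : List Int) : contrib cards 0 = 0 := by
  induction cards with
  | nil => simp [contrib]
  | cons c cs ih =>
    simp only [contrib, List.map_cons, List.sum_cons] at *
    have : min (max c 0) 0 = 0 := by omega
    omega

theorem solveWhile_eq (n : Nat) (cards : List Int) (L count : Int) (hn : L.toNat = n) :
    solveWhile cards L count =
      count + (if L ≤ 0 then 0 else contrib cards L + (L - 1)) := by
  induction n generalizing cards L count with
  | zero =>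
    have hL : ¬ L > 0 := by omega
    rw [solveWhile]; simp [hL]
  | succ m ih =>
    have hL : L > 0 := by omega
    rw [solveWhile]
    simp only [hL, dif_pos, solvePass_eq]
    rw [ih (decPass cards) (L - 1) _ (by omega)]
    have hc := contrib_step cards L hL
    by_cases h1 : L - 1 > 0
    · have h2 : ¬ L - 1 ≤ 0 := by omega
      have h3 : ¬ L ≤ 0 := by omega
      simp only [h1, if_pos, h2, if_neg, not_false_iff, h3]
      omega
    · have h1' : L = 1 := by omega
      subst h1'
      have hz := contrib_zero (decPass cards)
      norm_num at *
      omega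

-- ===== VERDICT (by name: the statement is the Claim_ definition above) =====
theorem solve_spec : Claim_equal_solve := by
  intro cards _ hpre
  unfold Spec_solve
  match cards with
  | [] => exact absurd rfl hpre
  | c :: rest =>
    simp only [solve, solve_alt]
    rw [solveWhile_eq (c + 1).toNat rest (c + 1) 0 rfl]
    by_cases h : c + 1 ≤ 0
    · simp [h]
    · simp only [h, if_neg, not_false_iff]
      simp [contrib]
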